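-- pv_equiv track=rewrite | github.com/thierryxdp/TCC | problems/842/solution_202913.py | pontos_por_time
-- ===== SOURCE A (Python) =====
-- def calculaPontos(golsArray, index):
--     if (golsArray[index] > golsArray[1 -index]):
--         return 3
--     if (golsArray[index] < golsArray[1 -index]):
--         return 0
--     else:
--         return 1
--
-- def pontos_por_time(jogos):
-- 	resultado = {}
-- 	for x in jogos:
-- 	    for y in range(2):
-- 	        if(x[y] in resultado):
-- 	            resultado[x[y]]+=calculaPontos(x[2],y)
-- 	        else:
-- 	            resultado[x[y]]=calculaPontos(x[2],y)
--
--
--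
-- 	return resultado
-- ===== SOURCE B (Python) =====
-- def pontos_por_time(jogos):
--     contribs = []
--     for x in jogos:
--         d = x[2][0] - x[2][1]
--         contribs.append((x[0], 3 if d > 0 else 1 if d == 0 else 0))
--         contribs.append((x[1], 3 if d < 0 else 1 if d == 0 else 0))
--     seen = set()
--     order = []
--     for t, _ in contribs:
--         if t not in seen:
--             seen.add(t)
--             order.append(t)
--     return {t: sum(p for s, p in contribs if s == t) for t in order}
-- ===== Notes on version B (the rewrite author's own statement) =====
-- stated objective: alternative
-- what changed: Replaces A's incremental dict accumulation (inner range(2) loop with a comparison helper per slot) by three staged passes: flatten the games into a (team, points) contribution list, ordered-dedup the team names, then build the result by a group-sum over the contributions for each team; trades A's O(1) dict update per game for a per-team scan of the contribution list.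
import Mathlib
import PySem

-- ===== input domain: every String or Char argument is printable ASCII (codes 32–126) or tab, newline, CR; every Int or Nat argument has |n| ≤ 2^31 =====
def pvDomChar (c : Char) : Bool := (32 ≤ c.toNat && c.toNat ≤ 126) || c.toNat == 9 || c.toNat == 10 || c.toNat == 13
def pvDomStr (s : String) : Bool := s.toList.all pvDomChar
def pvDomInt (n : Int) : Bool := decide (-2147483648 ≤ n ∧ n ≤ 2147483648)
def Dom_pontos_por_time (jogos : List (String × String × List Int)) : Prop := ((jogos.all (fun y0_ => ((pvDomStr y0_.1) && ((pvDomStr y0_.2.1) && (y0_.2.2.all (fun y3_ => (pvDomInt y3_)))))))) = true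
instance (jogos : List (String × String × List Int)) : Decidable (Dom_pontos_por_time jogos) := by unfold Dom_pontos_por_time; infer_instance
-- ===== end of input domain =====

-- B replaces A's one-pass dict accumulation by staged passes (flatten to a contribution
-- list, ordered-dedup the teams, group-sum per team); objective: alternative algorithm.

-- ===== PORT A =====
def calculaPontos (golsArray : List Int) (index : Int) : Int :=
  -- golsArray[index] / golsArray[1-index]: Python raises IndexError when out of range;
  -- those inputs are excluded by Pre_ below, the .getD 0 is never reached inside Pre_.
  let a := (PySem.List.pyGet? golsArray index).getD 0
  let b := (PySem.List.pyGet? golsArray (1 - index)).getD 0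
  if a > b then 3 else if a < b then 0 else 1

def pontos_por_time (jogos : List (String × String × List Int)) : List (String × Int) :=
  (jogos.foldl (fun resultado x =>
      (PySem.List.pyRange 0 2 1).foldl (fun resultado y =>
        let team := if y == 0 then x.1 else x.2.1   -- x[y] on the pair, y ∈ {0,1}
        match resultado.get? team with
        | some v => resultado.insert team (v + calculaPontos x.2.2 y)
        | none   => resultado.insert team (calculaPontos x.2.2 y))
        resultado)
    (PySem.Dict.empty : PySem.Dict String Int)).items

-- ===== PORT B =====
def pontos_por_time_alt (jogos : List (String × String × List Int)) : List (String × Int) :=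
  -- pass 1: flat list of (team, points) contributions, two per game
  let contribs : List (String × Int) := jogos.foldl (fun acc x =>
      let d := (PySem.List.pyGet? x.2.2 0).getD 0 - (PySem.List.pyGet? x.2.2 1).getD 0
        -- x[2][0] - x[2][1]; IndexError excluded by Pre_
      acc ++ [(x.1, if d > 0 then (3 : Int) else if d = 0 then 1 else 0),
              (x.2.1, if d < 0 then (3 : Int) else if d = 0 then 1 else 0)]) []
  -- pass 2: team names in first-occurrence order (the Python 'seen' set + 'order' list
  -- is exactly a PySem.Set built by Set.add, which IS the first-insertion-order list)
  let order : PySem.Set String :=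
    contribs.foldl (fun s p => PySem.Set.add s p.1) PySem.Set.empty
  -- pass 3: group-sum of each team's contributions
  order.map (fun t => (t, ((contribs.filter (fun p => p.1 == t)).map (·.2)).sum))

-- ===== PRECONDITION & SPEC =====
-- Pre_ excludes games whose goals list has fewer than 2 entries: there both A and B
-- raise IndexError (x[2][0]/x[2][1]).
def Pre_pontos_por_time (jogos : List (String × String × List Int)) : Prop :=
  (jogos.all (fun x => 2 ≤ x.2.2.length)) = true
instance (jogos : List (String × String × List Int)) : Decidable (Pre_pontos_por_time jogos) := by unfold Pre_pontos_por_time; infer_instance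
def pvWitness_pontos_por_time : (List (String × String × List Int)) :=
  [("a", "b", [2, 1]), ("b", "a", [0, 0])]

def Spec_pontos_por_time (jogos : List (String × String × List Int)) (out : List (String × Int)) : Prop := out = pontos_por_time_alt jogos
instance (jogos : List (String × String × List Int)) (out : List (String × Int)) : Decidable (Spec_pontos_por_time jogos out) := by unfold Spec_pontos_por_time; infer_instance

-- ===== CLAIM (what is proved, stated in full; the proofs are below) =====
def Claim_equal_pontos_por_time : Prop := ∀ (jogos : List (String × String × List Int)), Dom_pontos_por_time jogos → Pre_pontos_por_time jogos → Spec_pontos_por_time jogos (pontos_por_time jogos)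

-- ===== LEMMAS AND PROOFS =====

-- the two contributions of one game, as B computes them
def pvPair (x : String × String × List Int) : List (String × Int) :=
  let d := (PySem.List.pyGet? x.2.2 0).getD 0 - (PySem.List.pyGet? x.2.2 1).getD 0
  [(x.1, if d > 0 then (3 : Int) else if d = 0 then 1 else 0),
   (x.2.1, if d < 0 then (3 : Int) else if d = 0 then 1 else 0)]

-- the accumulation step "resultado[k] = resultado.get(k, 0) + v"
def pvStep (r : PySem.Dict String Int) (p : String × Int) : PySem.Dict String Int :=
  r.insert p.1 (r.getD p.1 0 + p.2)

-- A's inner range(2) loop on one game performs exactly the two pvStep updates of pvPair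
lemma pv_step_eq (r : PySem.Dict String Int) (x : String × String × List Int) :
    (PySem.List.pyRange 0 2 1).foldl (fun resultado y =>
        let team := if y == 0 then x.1 else x.2.1
        match resultado.get? team with
        | some v => resultado.insert team (v + calculaPontos x.2.2 y)
        | none   => resultado.insert team (calculaPontos x.2.2 y))
      r
    = (pvPair x).foldl pvStep r := by
  have hrange : PySem.List.pyRange 0 2 1 = [0, 1] := by decide
  rw [hrange]
  simp only [List.foldl_cons, List.foldl_nil, calculaPontos, pvPair, pvStep]
  norm_num
  set g0 := (PySem.List.pyGet? x.2.2 0).getD 0 with hg0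
  set g1 := (PySem.List.pyGet? x.2.2 1).getD 0 with hg1
  have h1 : (if g0 > g1 then (3:Int) else if g0 < g1 then 0 else 1)
      = (if g0 - g1 > 0 then (3:Int) else if g0 - g1 = 0 then 1 else 0) := by
    split_ifs <;> omega
  have h2 : (if g1 > g0 then (3:Int) else if g1 < g0 then 0 else 1)
      = (if g0 - g1 < 0 then (3:Int) else if g0 - g1 = 0 then 1 else 0) := by
    split_ifs <;> omega
  rw [h1, h2]
  have step1 : ∀ (d : PySem.Dict String Int) (k : String) (v : Int),
      (match d.get? k with
       | some w => d.insert k (w + v)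
       | none   => d.insert k v) = d.insert k (d.getD k 0 + v) := by
    intro d k v
    cases hk : d.get? k with
    | none => rw [PySem.Dict.getD_eq_get?_getD, hk]; simp
    | some w => rw [PySem.Dict.getD_eq_get?_getD, hk]; simp
  rw [step1, step1]
  simp only [gt_iff_lt, sub_pos, sub_neg]

-- A's whole fold is the pvStep-fold over the flattened contribution list
lemma pv_fold_flat (l : List (String × String × List Int)) (r : PySem.Dict String Int) :
    l.foldl (fun resultado x =>
        (PySem.List.pyRange 0 2 1).foldl (fun resultado y =>
          let team := if y == 0 then x.1 else x.2.1
          match resultado.get? team with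
          | some v => resultado.insert team (v + calculaPontos x.2.2 y)
          | none   => resultado.insert team (calculaPontos x.2.2 y))
          resultado)
      r
    = (l.flatMap pvPair).foldl pvStep r := by
  induction l generalizing r with
  | nil => rfl
  | cons x xs ih =>
    simp only [List.foldl_cons, List.flatMap_cons, List.foldl_append]
    rw [pv_step_eq]
    exact ih _

-- B's contribution list is that same flattening
lemma pv_contribs_eq (l : List (String × String × List Int)) :
    l.foldl (fun acc x =>
      let d := (PySem.List.pyGet? x.2.2 0).getD 0 - (PySem.List.pyGet? x.2.2 1).getD 0
      acc ++ [(x.1, if d > 0 then (3 : Int) else if d = 0 then 1 else 0),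
              (x.2.1, if d < 0 then (3 : Int) else if d = 0 then 1 else 0)]) []
    = l.flatMap pvPair := by
  rw [PySem.List.foldl_append_eq_flatMap]
  rfl

-- the value accumulated for a key by a pvStep-fold is the group-sum of its contributions
lemma pv_getD_fold (cs : List (String × Int)) (d : PySem.Dict String Int) (k : String) :
    (cs.foldl pvStep d).getD k 0
      = d.getD k 0 + ((cs.filter (fun p => p.1 == k)).map (·.2)).sum := by
  induction cs generalizing d with
  | nil => simp
  | cons p ps ih =>
    simp only [List.foldl_cons, List.filter_cons]
    rw [ih]
    by_cases h : p.1 = k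
    · simp [pvStep, h, PySem.Dict.getD_insert_self]
      ring
    · simp [pvStep, PySem.Dict.getD_insert, h, Ne.symm h]

-- ===== VERDICT (by name: the statement is the Claim_ definition above) =====
theorem pontos_por_time_spec : Claim_equal_pontos_por_time := by
  intro jogos _ _
  unfold Spec_pontos_por_time pontos_por_time pontos_por_time_alt
  rw [pv_fold_flat, pv_contribs_eq]
  set cs := jogos.flatMap pvPair with hcs
  have hnodup : ((cs.foldl pvStep PySem.Dict.empty).keys).Nodup := by
    exact PySem.Dict.nodup_keys_foldl_insert_key cs Prod.fst _ _ PySem.Dict.nodup_keys_empty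
  rw [PySem.Dict.items_eq_map_keys _ hnodup 0]
  have hkeys : (cs.foldl pvStep PySem.Dict.empty).keys
      = cs.foldl (fun s p => PySem.Set.add s p.1) PySem.Set.empty := by
    have := PySem.Dict.keys_foldl_insert_key cs Prod.fst
      (fun d p => d.getD p.1 0 + p.2) (PySem.Dict.empty : PySem.Dict String Int)
    simpa [pvStep, PySem.Set.update, PySem.Dict.keys_empty, List.foldl_map,
      PySem.Set.empty] using this
  rw [hkeys]
  apply List.map_congr_left
  intro t _
  rw [pv_getD_fold]
  simp
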